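-- pv_equiv track=rewrite | github.com/JJong-Min/SWjungle2nd_Study | [Week05~]Additional PS/[프로그래머스] 여행 경로.py | dfs
-- ===== SOURCE A (Python) =====
-- def dfs(routes):
--     stack = ["ICN"]
--     path = []
--     while stack:
--         position = stack[-1]
--         if position not in routes or len(routes[position]) == 0:
--             path.append(stack.pop())
--         else:
--             stack.append(routes[position].pop(0))
--     return path[::-1]
-- ===== SOURCE B (Python) =====
-- def dfs(routes):
--     used = {}
--     order = []
--
--     def visit(pos):
--         dests = routes.get(pos, [])
--         while used.get(pos, 0) < len(dests):
--             i = used.get(pos, 0)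
--             used[pos] = i + 1
--             visit(dests[i])
--         order.append(pos)
--
--     visit("ICN")
--     order.reverse()
--     return order
-- ===== Notes on version B (the rewrite author's own statement) =====
-- stated objective: alternative
-- what changed: A's explicit-stack loop that destructively pop(0)s the adjacency lists is replaced by a recursive visit(pos) that never mutates routes: it keeps a per-node counter dict of how many destinations were consumed and indexes dests[i] directly, post-order-appending to order; same traversal order, and O(E) index reads instead of O(E^2) pop(0) shifting, though constants dominate on problem-sized inputs.
import Mathlib
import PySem

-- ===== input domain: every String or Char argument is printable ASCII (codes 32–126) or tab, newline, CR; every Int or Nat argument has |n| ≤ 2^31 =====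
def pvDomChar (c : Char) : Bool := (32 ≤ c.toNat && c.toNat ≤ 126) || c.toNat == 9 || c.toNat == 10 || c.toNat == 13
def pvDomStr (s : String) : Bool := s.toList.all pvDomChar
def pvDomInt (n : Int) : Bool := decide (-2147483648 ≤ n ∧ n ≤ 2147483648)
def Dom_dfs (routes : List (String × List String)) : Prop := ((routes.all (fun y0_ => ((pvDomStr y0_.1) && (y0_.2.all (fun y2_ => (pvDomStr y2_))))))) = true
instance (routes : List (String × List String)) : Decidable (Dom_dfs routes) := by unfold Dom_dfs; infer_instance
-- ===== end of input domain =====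

-- B replaces A's explicit-stack loop (which destructively pop(0)s the dict's lists) by a
-- recursive visit with a read-only adjacency dict and a per-node consumed-counter dict;
-- A mutates its routes argument in Python, B does not — the equivalence proved is about the
-- RETURN value only.

-- total number of remaining destinations in A's dict (termination measure for port A)
def pvEdges (d : PySem.Dict String (List String)) : Nat :=
  (d.items.map (fun p => p.2.length)).sum

-- list-level core of port A's termination argument (used by pvEdges_insert_lt)
theorem pvEdges_replace (l : List (String × List String)) (k x : String) (xs : List String)
    (hkeys : (l.map Prod.fst).Nodup)
    (hfind : List.find? (fun p => p.1 == k) l = some (k, x :: xs)) :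
    ((l.map (fun p => if (p.1 == k) = true then (k, xs) else p)).map (fun p => p.2.length)).sum + 1
      = (l.map (fun p => p.2.length)).sum := by
  induction l with
  | nil => simp at hfind
  | cons p t ih =>
    by_cases hpk : (p.1 == k) = true
    · have hp1 : p.1 = k := by simpa using hpk
      simp only [List.find?_cons, hpk] at hfind
      have hp2 : p.2 = x :: xs := by cases p; simp_all
      have htail : ∀ q ∈ t, (if (q.1 == k) = true then (k, xs) else q) = q := by
        intro q hq
        have hqk : q.1 ≠ k := by
          intro hqk
          simp only [List.map_cons, List.nodup_cons] at hkeys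
          exact hkeys.1 (by rw [hp1, ← hqk]; exact List.mem_map_of_mem hq)
        simp [hqk]
      simp only [List.map_cons, List.map_congr_left htail, List.sum_cons, if_pos hpk, hp2]
      simp only [List.length_cons, List.map_id']
      omega
    · have hpk' : (p.1 == k) = false := by simpa using hpk
      simp only [List.find?_cons, hpk'] at hfind
      have hkt : (t.map Prod.fst).Nodup := by
        simp only [List.map_cons, List.nodup_cons] at hkeys; exact hkeys.2
      have := ih hkt hfind
      simp only [List.map_cons, List.sum_cons, if_neg hpk]
      omega

-- removing one destination from an existing entry strictly decreases pvEdges (cited by port A)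
theorem pvEdges_insert_lt (d : PySem.Dict String (List String)) (k x : String) (xs : List String)
    (hd : d.keys.Nodup) (h : d.get? k = some (x :: xs)) :
    pvEdges (d.insert k xs) < pvEdges d := by
  have hc : d.contains k = true := by
    rw [PySem.Dict.contains_eq_isSome_get?, h]; rfl
  have hfind : (List.find? (fun q => q.1 == k) d.items) = some (k, x :: xs) := by
    unfold PySem.Dict.get? at h
    cases hf : List.find? (fun q => q.1 == k) d.items with
    | none => rw [hf] at h; simp at h
    | some p =>
      rw [hf] at h
      have hp1 : (p.1 == k) = true := List.find?_some (p := fun q : String × List String => q.1 == k) hf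
      obtain ⟨p1, p2⟩ := p
      simp_all
  have hkeys : (d.items.map Prod.fst).Nodup := hd
  unfold pvEdges
  rw [PySem.Dict.items_insert_of_contains d xs hc]
  have := pvEdges_replace d.items k x xs hkeys hfind
  omega

-- ===== PORT A =====
-- stack with its top at the HEAD of the list; the Nodup proof argument only justifies termination
def dfsLoop (d : PySem.Dict String (List String)) (hd : d.keys.Nodup)
    (stack : List String) (path : List String) : List String :=
  match stack with
  | [] => path.reverse
  | pos :: rest =>
    match h : d.get? pos with
    | none => dfsLoop d hd rest (path ++ [pos])
    | some [] => dfsLoop d hd rest (path ++ [pos])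
    | some (x :: xs) =>
      dfsLoop (d.insert pos xs) (PySem.Dict.nodup_keys_insert d pos xs hd) (x :: pos :: rest) path
termination_by 2 * pvEdges d + stack.length
decreasing_by
  · simp
  · simp
  · have := pvEdges_insert_lt d pos x xs hd h
    simp only [List.length_cons]
    omega

def dfs (routes : List (String × List String)) : List String :=
  dfsLoop (PySem.Dict.ofList routes) (PySem.Dict.nodup_keys_ofList routes) ["ICN"] []

-- how many destinations the counter dict `used` still leaves unread (termination measure for port B)
def pvLeft (items : List (String × List String)) (used : PySem.Dict String Nat) : Nat :=
  (items.map (fun p => p.2.length - used.getD p.1 0)).sum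

-- raising any counter never raises pvLeft (used by pvLeft_dec)
theorem pvLeft_insert_le (items : List (String × List String)) (used : PySem.Dict String Nat)
    (pos : String) (v : Nat) (hv : used.getD pos 0 ≤ v) :
    pvLeft items (used.insert pos v) ≤ pvLeft items used := by
  induction items with
  | nil => simp [pvLeft]
  | cons p t ih =>
    simp only [pvLeft, List.map_cons, List.sum_cons] at *
    have hh : p.2.length - (used.insert pos v).getD p.1 0 ≤ p.2.length - used.getD p.1 0 := by
      rw [PySem.Dict.getD_insert]
      split
      · next he => rw [he]; omega
      · omega
    omega

-- bumping the counter of a node that still has an unread destination strictly decreases pvLeft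
theorem pvLeft_find_lt (items : List (String × List String)) (used : PySem.Dict String Nat)
    (pos : String) (l : List String)
    (hf : items.find? (fun p => p.1 == pos) = some (pos, l))
    (hi : used.getD pos 0 < l.length) :
    pvLeft items (used.insert pos (used.getD pos 0 + 1)) < pvLeft items used := by
  induction items with
  | nil => simp at hf
  | cons p t ih =>
    by_cases hpk : (p.1 == pos) = true
    · have hp1 : p.1 = pos := by simpa using hpk
      simp only [List.find?_cons, hpk] at hf
      have hp2 : p.2 = l := by cases p; simp_all
      have ht := pvLeft_insert_le t used pos (used.getD pos 0 + 1) (by omega)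
      simp only [pvLeft, List.map_cons, List.sum_cons] at *
      rw [hp1, hp2, PySem.Dict.getD_insert_self]
      omega
    · have hpk' : (p.1 == pos) = false := by simpa using hpk
      simp only [List.find?_cons, hpk'] at hf
      have hne : p.1 ≠ pos := by simpa using hpk
      have := ih hf
      simp only [pvLeft, List.map_cons, List.sum_cons] at *
      rw [PySem.Dict.getD_insert_of_ne used _ _ hne]
      omega

-- a successful get? is a successful find? on items, with the key normalised
theorem pvGet?_find (d : PySem.Dict String (List String)) (k : String) (v : List String)
    (h : d.get? k = some v) :
    d.items.find? (fun p => p.1 == k) = some (k, v) := by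
  unfold PySem.Dict.get? at h
  cases hf : List.find? (fun q => q.1 == k) d.items with
  | none => rw [hf] at h; simp at h
  | some p =>
    rw [hf] at h
    have hp1 : (p.1 == k) = true := List.find?_some (p := fun q : String × List String => q.1 == k) hf
    obtain ⟨p1, p2⟩ := p
    simp_all

-- the guard of B's while loop being true strictly decreases pvLeft (cited by port B)
theorem pvLeft_dec (d0 : PySem.Dict String (List String)) (used : PySem.Dict String Nat)
    (pos : String) (h : used.getD pos 0 < (d0.getD pos []).length) :
    pvLeft d0.items (used.insert pos (used.getD pos 0 + 1)) < pvLeft d0.items used := by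
  cases hg : d0.get? pos with
  | none =>
    rw [PySem.Dict.getD_of_get?_eq_none d0 [] hg] at h
    simp at h
  | some l =>
    rw [PySem.Dict.getD_of_get?_eq_some d0 [] hg] at h
    exact pvLeft_find_lt d0.items used pos l (pvGet?_find d0 pos l hg) h

-- ===== PORT B =====
-- recursive Hierholzer over a READ-ONLY adjacency dict d0: `used` counts consumed destinations
-- per node, the while loop re-enters as the second self-call, appends are returned in order;
-- the subtype part (pvLeft never grows) only justifies termination
def visitB (d0 : PySem.Dict String (List String)) (used : PySem.Dict String Nat) (pos : String) :
    {r : PySem.Dict String Nat × List String // pvLeft d0.items r.1 ≤ pvLeft d0.items used} :=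
  if h : used.getD pos 0 < (d0.getD pos []).length then
    let r1 := visitB d0 (used.insert pos (used.getD pos 0 + 1)) ((d0.getD pos [])[used.getD pos 0])
    let r2 := visitB d0 r1.val.1 pos
    ⟨(r2.val.1, r1.val.2 ++ r2.val.2),
      le_trans r2.property (le_trans r1.property (le_of_lt (pvLeft_dec d0 used pos h)))⟩
  else
    ⟨(used, [pos]), le_refl _⟩
termination_by pvLeft d0.items used
decreasing_by
  · exact pvLeft_dec d0 used pos h
  · exact lt_of_le_of_lt r1.property (pvLeft_dec d0 used pos h)

def dfs_alt (routes : List (String × List String)) : List String :=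
  (visitB (PySem.Dict.ofList routes) PySem.Dict.empty "ICN").val.2.reverse

-- ===== PRECONDITION & SPEC =====
def Spec_dfs (routes : List (String × List String)) (out : List String) : Prop := out = dfs_alt routes
instance (routes : List (String × List String)) (out : List String) : Decidable (Spec_dfs routes out) := by unfold Spec_dfs; infer_instance

-- ===== CLAIM (what is proved, stated in full; the proofs are below) =====
def Claim_equal_dfs : Prop := ∀ (routes : List (String × List String)), Dom_dfs routes → Spec_dfs routes (dfs routes)

-- ===== LEMMAS AND PROOFS =====

-- A's dict after some pops is d0 with each list's consumed prefix dropped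
def pvDrop (used : PySem.Dict String Nat) (p : String × List String) : String × List String :=
  (p.1, p.2.drop (used.getD p.1 0))

theorem dfsLoop_nil (d : PySem.Dict String (List String)) (hd : d.keys.Nodup) (path : List String) :
    dfsLoop d hd [] path = path.reverse := by
  rw [dfsLoop]

theorem dfsLoop_pop (d : PySem.Dict String (List String)) (hd : d.keys.Nodup)
    (pos : String) (rest path : List String)
    (h : d.get? pos = none ∨ d.get? pos = some []) :
    dfsLoop d hd (pos :: rest) path = dfsLoop d hd rest (path ++ [pos]) := by
  rw [dfsLoop]
  rcases h with h | h <;> split <;> simp_all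

theorem dfsLoop_push (d : PySem.Dict String (List String)) (hd : d.keys.Nodup)
    (pos x : String) (xs : List String) (rest path : List String)
    (h : d.get? pos = some (x :: xs)) :
    dfsLoop d hd (pos :: rest) path
      = dfsLoop (d.insert pos xs) (PySem.Dict.nodup_keys_insert d pos xs hd)
          (x :: pos :: rest) path := by
  rw [dfsLoop]
  split <;> simp_all

theorem dfsLoop_congr (d d' : PySem.Dict String (List String)) (hdd : d = d')
    (hd : d.keys.Nodup) (hd' : d'.keys.Nodup) (stack : List String)
    (path path' : List String) (hp : path = path') :
    dfsLoop d hd stack path = dfsLoop d' hd' stack path' := by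
  subst hdd; subst hp; rfl

theorem visitB_neg (d0 : PySem.Dict String (List String)) (used : PySem.Dict String Nat)
    (pos : String) (h : ¬ used.getD pos 0 < (d0.getD pos []).length) :
    (visitB d0 used pos).val = (used, [pos]) := by
  rw [visitB, dif_neg h]

theorem visitB_pos (d0 : PySem.Dict String (List String)) (used : PySem.Dict String Nat)
    (pos : String) (h : used.getD pos 0 < (d0.getD pos []).length) :
    (visitB d0 used pos).val =
      ((visitB d0 (visitB d0 (used.insert pos (used.getD pos 0 + 1))
          ((d0.getD pos [])[used.getD pos 0])).val.1 pos).val.1,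
       (visitB d0 (used.insert pos (used.getD pos 0 + 1))
          ((d0.getD pos [])[used.getD pos 0])).val.2 ++
       (visitB d0 (visitB d0 (used.insert pos (used.getD pos 0 + 1))
          ((d0.getD pos [])[used.getD pos 0])).val.1 pos).val.2) := by
  rw [visitB, dif_pos h]

-- lookups in a dict whose items are d0's with dropped prefixes
theorem pvGet?_mapDrop (items : List (String × List String)) (used : PySem.Dict String Nat)
    (k : String) :
    (PySem.Dict.mk (items.map (pvDrop used))).get? k
      = ((PySem.Dict.mk items).get? k).map (fun l => l.drop (used.getD k 0)) := by
  induction items with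
  | nil => rfl
  | cons p t ih =>
    simp only [List.map_cons, pvDrop]
    rw [PySem.Dict.get?_mk_cons, PySem.Dict.get?_mk_cons]
    by_cases hpk : (p.1 == k) = true
    · have hp1 : p.1 = k := by simpa using hpk
      rw [if_pos hpk, if_pos hpk, hp1]
      rfl
    · rw [if_neg hpk, if_neg hpk]
      exact ih

-- the dropped-prefix items after A's in-place replacement are the dropped-prefix items for the bumped counter
theorem pvItems_step (items : List (String × List String)) (used : PySem.Dict String Nat)
    (pos : String) (l : List String) (i : Nat)
    (hk : (items.map Prod.fst).Nodup)
    (hf : items.find? (fun p => p.1 == pos) = some (pos, l)) :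
    (items.map (pvDrop used)).map
        (fun p => if (p.1 == pos) = true then (pos, l.drop (i + 1)) else p)
      = items.map (pvDrop (used.insert pos (i + 1))) := by
  induction items with
  | nil => simp
  | cons p t ih =>
    by_cases hpk : (p.1 == pos) = true
    · have hp1 : p.1 = pos := by simpa using hpk
      simp only [List.find?_cons, hpk] at hf
      have hp2 : p.2 = l := by cases p; simp_all
      simp only [List.map_cons, List.map_map]
      congr 1
      · simp [pvDrop, hp1, hp2, PySem.Dict.getD_insert_self]
      · apply List.map_congr_left
        intro q hq
        have hqk : q.1 ≠ pos := by
          intro hqk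
          simp only [List.map_cons, List.nodup_cons] at hk
          exact hk.1 (by rw [hp1, ← hqk]; exact List.mem_map_of_mem hq)
        simp [pvDrop, hqk, PySem.Dict.getD_insert_of_ne used _ _ hqk]
    · have hpk' : (p.1 == pos) = false := by simpa using hpk
      simp only [List.find?_cons, hpk'] at hf
      have hkt : (t.map Prod.fst).Nodup := by
        simp only [List.map_cons, List.nodup_cons] at hk; exact hk.2
      have hne : p.1 ≠ pos := by simpa using hpk
      simp only [List.map_cons, List.map_map]
      congr 1
      · simp [pvDrop, hpk, PySem.Dict.getD_insert_of_ne used _ _ hne]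
      · have ht := ih hkt hf
        rw [List.map_map] at ht
        exact ht

-- dropped-prefix items keep d0's keys, hence their Nodup property
theorem pvKeys_mapDrop (items : List (String × List String)) (used : PySem.Dict String Nat)
    (hk : (items.map Prod.fst).Nodup) :
    ((items.map (pvDrop used)).map Prod.fst).Nodup := by
  have : (items.map (pvDrop used)).map Prod.fst = items.map Prod.fst := by
    rw [List.map_map]; rfl
  rw [this]; exact hk

-- unread-or-missing entry: A's dropped-prefix dict pops exactly when B's guard is false
theorem pvPop_case (d0 : PySem.Dict String (List String)) (used : PySem.Dict String Nat)
    (pos : String) (h : ¬ used.getD pos 0 < (d0.getD pos []).length) :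
    (PySem.Dict.mk (d0.items.map (pvDrop used))).get? pos = none ∨
      (PySem.Dict.mk (d0.items.map (pvDrop used))).get? pos = some [] := by
  cases hg : d0.get? pos with
  | none =>
    left
    rw [pvGet?_mapDrop, show (PySem.Dict.mk d0.items) = d0 from rfl, hg]
    rfl
  | some l =>
    right
    rw [pvGet?_mapDrop, show (PySem.Dict.mk d0.items) = d0 from rfl, hg]
    rw [PySem.Dict.getD_of_get?_eq_some d0 [] hg] at h
    simp [List.drop_eq_nil_of_le (by omega : l.length ≤ used.getD pos 0)]

-- A's loop, run with `pos` on top of the stack over the dropped-prefix dict, does exactly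
-- what one call of B's visitB does
theorem loop_visitB (d0 : PySem.Dict String (List String)) (hk0 : d0.keys.Nodup) (n : Nat) :
    ∀ (used : PySem.Dict String Nat), pvLeft d0.items used ≤ n →
    ∀ (pos : String) (rest path : List String)
      (hd : ((d0.items.map (pvDrop used)).map Prod.fst).Nodup)
      (hd' : ((d0.items.map (pvDrop (visitB d0 used pos).val.1)).map Prod.fst).Nodup),
      dfsLoop (PySem.Dict.mk (d0.items.map (pvDrop used))) hd (pos :: rest) path
        = dfsLoop (PySem.Dict.mk (d0.items.map (pvDrop (visitB d0 used pos).val.1))) hd' rest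
            (path ++ (visitB d0 used pos).val.2) := by
  induction n with
  | zero =>
    intro used hle pos rest path hd hd'
    by_cases h : used.getD pos 0 < (d0.getD pos []).length
    · exact absurd hle (by have := pvLeft_dec d0 used pos h; omega)
    · have hv := visitB_neg d0 used pos h
      rw [dfsLoop_pop _ hd pos rest path (pvPop_case d0 used pos h)]
      exact dfsLoop_congr _ _ (PySem.Dict.ext (by rw [hv])) _ _ _ _ _ (by rw [hv])
  | succ n ih =>
    intro used hle pos rest path hd hd'
    by_cases h : used.getD pos 0 < (d0.getD pos []).length
    · -- push step
      have hlt := pvLeft_dec d0 used pos h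
      have hg : d0.get? pos = some (d0.getD pos []) := by
        cases hg0 : d0.get? pos with
        | none => rw [PySem.Dict.getD_of_get?_eq_none d0 [] hg0] at h; simp at h
        | some l => rw [PySem.Dict.getD_of_get?_eq_some d0 [] hg0]
      have hdrop : (d0.getD pos []).drop (used.getD pos 0)
          = (d0.getD pos [])[used.getD pos 0] :: (d0.getD pos []).drop (used.getD pos 0 + 1) :=
        List.drop_eq_getElem_cons h
      have hgetA : (PySem.Dict.mk (d0.items.map (pvDrop used))).get? pos
          = some ((d0.getD pos [])[used.getD pos 0]
              :: (d0.getD pos []).drop (used.getD pos 0 + 1)) := by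
        rw [pvGet?_mapDrop, show (PySem.Dict.mk d0.items) = d0 from rfl, hg]
        exact congrArg some hdrop
      rw [dfsLoop_push _ hd pos _ _ rest path hgetA]
      have hc : (PySem.Dict.mk (d0.items.map (pvDrop used))).contains pos = true := by
        rw [PySem.Dict.contains_eq_isSome_get?, hgetA]; rfl
      have hstep : ((PySem.Dict.mk (d0.items.map (pvDrop used))).insert pos
            ((d0.getD pos []).drop (used.getD pos 0 + 1))).items
          = d0.items.map (pvDrop (used.insert pos (used.getD pos 0 + 1))) := by
        rw [PySem.Dict.items_insert_of_contains _ _ hc]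
        exact pvItems_step d0.items used pos (d0.getD pos []) (used.getD pos 0) hk0
          (pvGet?_find d0 pos (d0.getD pos []) hg)
      have hd1 : ((d0.items.map (pvDrop (used.insert pos
          (used.getD pos 0 + 1)))).map Prod.fst).Nodup := pvKeys_mapDrop _ _ hk0
      rw [dfsLoop_congr _
        (PySem.Dict.mk (d0.items.map (pvDrop (used.insert pos (used.getD pos 0 + 1)))))
        (PySem.Dict.ext hstep) _ hd1 _ path path rfl]
      have hd2 : ((d0.items.map (pvDrop (visitB d0 (used.insert pos (used.getD pos 0 + 1))
          ((d0.getD pos [])[used.getD pos 0])).val.1)).map Prod.fst).Nodup :=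
        pvKeys_mapDrop _ _ hk0
      rw [ih (used.insert pos (used.getD pos 0 + 1)) (by omega)
        ((d0.getD pos [])[used.getD pos 0]) (pos :: rest) path hd1 hd2]
      have hd3 : ((d0.items.map (pvDrop (visitB d0
          (visitB d0 (used.insert pos (used.getD pos 0 + 1))
            ((d0.getD pos [])[used.getD pos 0])).val.1 pos).val.1)).map Prod.fst).Nodup :=
        pvKeys_mapDrop _ _ hk0
      rw [ih (visitB d0 (used.insert pos (used.getD pos 0 + 1))
          ((d0.getD pos [])[used.getD pos 0])).val.1
        (le_trans (visitB d0 (used.insert pos (used.getD pos 0 + 1))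
          ((d0.getD pos [])[used.getD pos 0])).property (by omega)) pos rest _ hd2 hd3]
      have hv := visitB_pos d0 used pos h
      exact dfsLoop_congr _ _ (PySem.Dict.ext (by rw [hv])) _ _ _ _ _
        (by rw [hv, List.append_assoc])
    · have hv := visitB_neg d0 used pos h
      rw [dfsLoop_pop _ hd pos rest path (pvPop_case d0 used pos h)]
      exact dfsLoop_congr _ _ (PySem.Dict.ext (by rw [hv])) _ _ _ _ _ (by rw [hv])

-- ===== VERDICT (by name: the statement is the Claim_ definition above) =====
theorem dfs_spec : Claim_equal_dfs := by
  intro routes _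
  unfold Spec_dfs dfs dfs_alt
  have hk0 : (PySem.Dict.ofList routes).keys.Nodup := PySem.Dict.nodup_keys_ofList routes
  have hid : (PySem.Dict.ofList routes).items.map (pvDrop PySem.Dict.empty)
      = (PySem.Dict.ofList routes).items := by
    conv_rhs => rw [← List.map_id (PySem.Dict.ofList routes).items]
    apply List.map_congr_left
    intro p _
    simp [pvDrop, PySem.Dict.getD_empty]
  have hd := pvKeys_mapDrop (PySem.Dict.ofList routes).items PySem.Dict.empty hk0
  have hd' := pvKeys_mapDrop (PySem.Dict.ofList routes).items
    (visitB (PySem.Dict.ofList routes) PySem.Dict.empty "ICN").val.1 hk0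
  rw [dfsLoop_congr (PySem.Dict.ofList routes)
      (PySem.Dict.mk ((PySem.Dict.ofList routes).items.map (pvDrop PySem.Dict.empty)))
      (PySem.Dict.ext hid.symm) hk0 hd _ _ _ rfl,
    loop_visitB (PySem.Dict.ofList routes) hk0
      (pvLeft (PySem.Dict.ofList routes).items PySem.Dict.empty)
      PySem.Dict.empty (le_refl _) "ICN" [] [] hd hd',
    dfsLoop_nil]
  simp
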